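-- pv_equiv track=rewrite | github.com/PatrickChoDev/2110581_BIOINFORMATICS | week7/spectrum.py | generate_spectrum
-- ===== SOURCE A (Python) =====
-- mass_table = {
--     "A": 71,
--     "C": 103,
--     "D": 115,
--     "E": 129,
--     "F": 147,
--     "G": 57,
--     "H": 137,
--     "I": 113,
--     "K": 128,
--     "L": 113,
--     "M": 131,
--     "N": 114,
--     "P": 97,
--     "Q": 128,
--     "R": 156,
--     "S": 87,
--     "T": 101,
--     "V": 99,
--     "W": 186,
--     "Y": 163,
-- }
--
-- def generate_spectrum(peptide):
--     prefix_masses = [0]  # Start with mass 0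
--     for i in range(len(peptide)):
--         prefix_masses.append(prefix_masses[-1] + mass_table[peptide[i]])
--
--     # Create the spectrum by considering both linear and circular subpeptides
--     peptide_mass = prefix_masses[-1]  # The total mass of the peptide
--     spectrum = [0]
--
--     # Linear subpeptides
--     for i in range(len(peptide)):
--         for j in range(i + 1, len(peptide) + 1):
--             spectrum.append(prefix_masses[j] - prefix_masses[i])
--
--     # Circular subpeptides
--     for i in range(len(peptide)):
--         for j in range(i + 1, len(peptide)):
--             spectrum.append(peptide_mass - (prefix_masses[j] - prefix_masses[i]))
--
--     return sorted(spectrum)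
-- ===== SOURCE B (Python) =====
-- mass_table = {
--     "A": 71,
--     "C": 103,
--     "D": 115,
--     "E": 129,
--     "F": 147,
--     "G": 57,
--     "H": 137,
--     "I": 113,
--     "K": 128,
--     "L": 113,
--     "M": 131,
--     "N": 114,
--     "P": 97,
--     "Q": 128,
--     "R": 156,
--     "S": 87,
--     "T": 101,
--     "V": 99,
--     "W": 186,
--     "Y": 163,
-- }
--
-- def generate_spectrum(peptide):
--     masses = [mass_table[c] for c in peptide]
--     total = sum(masses)
--     n = len(masses)
--     spectrum = [0]
--     for i in range(n):
--         for j in range(i + 1, n + 1):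
--             sub = sum(masses[i:j])
--             spectrum.append(sub)
--             if j != n:
--                 spectrum.append(total - sub)
--     return sorted(spectrum)
-- ===== Notes on version B (the rewrite author's own statement) =====
-- stated objective: simpler
-- what changed: B removes A's prefix-mass table and its separate linear and circular loops: it computes each subpeptide mass by summing masses[i:j] directly in a single fused i,j loop, emitting the circular complement total-sub alongside (for j != n).
import Mathlib
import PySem

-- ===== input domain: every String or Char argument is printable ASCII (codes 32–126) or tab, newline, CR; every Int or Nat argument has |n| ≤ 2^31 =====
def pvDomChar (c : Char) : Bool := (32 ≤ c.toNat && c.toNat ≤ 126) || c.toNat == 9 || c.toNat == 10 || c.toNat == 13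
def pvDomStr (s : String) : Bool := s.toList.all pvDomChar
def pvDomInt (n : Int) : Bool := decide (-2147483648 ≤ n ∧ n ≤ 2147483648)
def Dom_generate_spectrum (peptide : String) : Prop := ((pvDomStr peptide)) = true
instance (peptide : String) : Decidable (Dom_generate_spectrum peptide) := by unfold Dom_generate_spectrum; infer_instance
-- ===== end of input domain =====

-- B drops A's prefix-mass table and builds each subpeptide mass by summing a slice directly,
-- fusing A's two subpeptide loops into one pass (objective: simpler; not faster).

-- ===== PORT A =====
-- mass_table (Python dict with one-character string keys; s[i] is a Char under the type convention)
def massTable : PySem.Dict Char Int :=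
  PySem.Dict.ofList
    [('A',71),('C',103),('D',115),('E',129),('F',147),('G',57),('H',137),('I',113),('K',128),('L',113),
     ('M',131),('N',114),('P',97),('Q',128),('R',156),('S',87),('T',101),('V',99),('W',186),('Y',163)]

def generate_spectrum (peptide : String) : List Int :=
  let n : Int := PySem.Str.len peptide
  -- prefix_masses loop; mass_table[peptide[i]] raises KeyError on a residue outside the table
  -- (excluded by Pre_); inside Pre_ every lookup hits, so the defaults are never consulted
  let prefix_masses : List Int :=
    (PySem.List.pyRange 0 n).foldl (fun pm i =>
      pm ++ [PySem.List.pyGetD pm (-1) 0 +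
             (match PySem.Str.pyGet? peptide i with
              | some c => PySem.Dict.getD massTable c 0
              | none => 0)]) [0]
  let peptide_mass : Int := PySem.List.pyGetD prefix_masses (-1) 0
  -- linear subpeptides
  let spectrum1 : List Int :=
    (PySem.List.pyRange 0 n).foldl (fun s i =>
      (PySem.List.pyRange (i+1) (n+1)).foldl (fun s j =>
        s ++ [PySem.List.pyGetD prefix_masses j 0 - PySem.List.pyGetD prefix_masses i 0]) s) [0]
  -- circular subpeptides
  let spectrum2 : List Int :=
    (PySem.List.pyRange 0 n).foldl (fun s i =>
      (PySem.List.pyRange (i+1) n).foldl (fun s j =>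
        s ++ [peptide_mass - (PySem.List.pyGetD prefix_masses j 0 - PySem.List.pyGetD prefix_masses i 0)]) s) spectrum1
  PySem.List.sorted spectrum2 (fun x => x) false

-- ===== PORT B =====
def generate_spectrum_alt (peptide : String) : List Int :=
  -- masses = [mass_table[c] for c in peptide]; KeyError outside Pre_, every lookup hits inside
  let masses : List Int := peptide.toList.map (fun c => PySem.Dict.getD massTable c 0)
  let total : Int := masses.sum
  let n : Int := masses.length
  let spectrum : List Int :=
    (PySem.List.pyRange 0 n).foldl (fun s i =>
      (PySem.List.pyRange (i+1) (n+1)).foldl (fun s j =>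
        let sub := (PySem.List.slice masses (some i) (some j)).sum
        let s' := s ++ [sub]
        if j ≠ n then s' ++ [total - sub] else s') s) [0]
  PySem.List.sorted spectrum (fun x => x) false

-- ===== PRECONDITION & SPEC =====
-- Pre_ excludes exactly the inputs containing a character outside the 20-residue mass table,
-- on which the Python A raises KeyError.
def Pre_generate_spectrum (peptide : String) : Prop :=
  (peptide.toList.all (fun c =>
    (['A','C','D','E','F','G','H','I','K','L','M','N','P','Q','R','S','T','V','W','Y'] : List Char).contains c)) = true
instance (peptide : String) : Decidable (Pre_generate_spectrum peptide) := by
  unfold Pre_generate_spectrum; infer_instance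

def pvWitness_generate_spectrum : String := "GASP"

def Spec_generate_spectrum (peptide : String) (out : List Int) : Prop := out = generate_spectrum_alt peptide
instance (peptide : String) (out : List Int) : Decidable (Spec_generate_spectrum peptide out) := by unfold Spec_generate_spectrum; infer_instance

-- ===== CLAIM (what is proved, stated in full; the proofs are below) =====
def Claim_equal_generate_spectrum : Prop := ∀ (peptide : String), Dom_generate_spectrum peptide → Pre_generate_spectrum peptide → Spec_generate_spectrum peptide (generate_spectrum peptide)

-- ===== LEMMAS AND PROOFS =====

-- the residue mass and the prefix sums, as pure functions (proof-side helpers)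
def pvMass (c : Char) : Int := PySem.Dict.getD massTable c 0
def pvPref (cs : List Char) (k : Nat) : Int := ((cs.take k).map pvMass).sum

theorem pvSlice_sum (cs : List Char) (i j : Nat) (hij : i ≤ j) (_hj : j ≤ cs.length) :
    (PySem.List.slice (cs.map pvMass) (some (i : Int)) (some (j : Int))).sum
      = pvPref cs j - pvPref cs i := by
  rw [PySem.List.slice_natCast]
  have key : List.take j (List.map pvMass cs)
      = List.take i (List.map pvMass cs) ++ List.take (j-i) (List.drop i (List.map pvMass cs)) := by
    rw [← List.take_add]; congr 1; omega
  unfold pvPref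
  rw [List.map_take, List.map_take, key, List.sum_append]
  ring

theorem pvPrefix_fold (peptide : String) (M : Nat) (hM : M ≤ peptide.toList.length) :
    (PySem.List.pyRange 0 (M : Int)).foldl (fun pm i =>
      pm ++ [PySem.List.pyGetD pm (-1) 0 +
             (match PySem.Str.pyGet? peptide i with
              | some c => PySem.Dict.getD massTable c 0
              | none => 0)]) [0]
    = (List.range (M+1)).map (fun k => pvPref peptide.toList k) := by
  induction M with
  | zero => simp [pvPref]
  | succ M ih =>
    have hlt : M < peptide.toList.length := by omega
    have h1 : ((M+1 : Nat) : Int) = (M : Int) + 1 := by push_cast; ring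
    have hget : PySem.Str.pyGet? peptide (M : Int) = some (peptide.toList[M]) := by
      simp [PySem.Str.pyGet?]
    have hpref : pvPref peptide.toList (M+1) = pvPref peptide.toList M + pvMass peptide.toList[M] := by
      unfold pvPref
      rw [List.map_take, List.map_take, List.take_add_one]
      simp [List.getElem?_eq_getElem hlt]
    rw [h1, PySem.List.pyRange_one_succ_right (by positivity), List.foldl_append,
        ih (by omega)]
    simp only [List.foldl_cons, List.foldl_nil, hget]
    rw [List.range_succ (n := M+1), List.map_append]
    congr 1
    rw [List.range_succ (n := M), List.map_append]
    simp only [List.map_cons, List.map_nil]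
    rw [PySem.List.pyGetD_neg_one_append_singleton]
    simp [hpref, pvMass]

-- value of pyGetD on the prefix table
theorem pvGetP (cs : List Char) (z : Int) (h0 : 0 ≤ z) (h1 : z ≤ (cs.length : Int)) :
    PySem.List.pyGetD ((List.range (cs.length+1)).map (fun k => pvPref cs k)) z 0
      = pvPref cs z.toNat := by
  obtain ⟨k, rfl⟩ : ∃ k : Nat, z = (k : Int) := ⟨z.toNat, by omega⟩
  rw [PySem.List.pyGetD_natCast]
  rw [PySem.List.getD_map_range _ _ _ _ (by omega)]
  simp


theorem pvMain (peptide : String) :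
    generate_spectrum peptide = generate_spectrum_alt peptide := by
  unfold generate_spectrum generate_spectrum_alt
  simp only [PySem.Str.len_eq]
  rw [pvPrefix_fold peptide peptide.toList.length (le_refl _)]
  simp only [List.length_map,
    show (fun c => PySem.Dict.getD massTable c 0) = pvMass from rfl]
  -- peptide_mass = pvPref cs N
  have hpm : PySem.List.pyGetD
      ((List.range (peptide.toList.length+1)).map (fun k => pvPref peptide.toList k)) (-1) 0
      = pvPref peptide.toList peptide.toList.length := by
    rw [List.range_succ, List.map_append]
    simp only [List.map_cons, List.map_nil]
    rw [PySem.List.pyGetD_neg_one_append_singleton]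
  rw [hpm]
  -- B: push the appended pair into one append
  have hsplit : ∀ (s : List Int) (p : Prop) (_ : Decidable p) (a b : Int),
      (if p then s ++ [a] ++ [b] else s ++ [a]) = s ++ (if p then [a, b] else [a]) := by
    intro s p hp a b; split_ifs <;> simp
  simp only [hsplit]
  -- folds to flatMaps
  simp only [PySem.List.foldl_append_singleton_eq_map, PySem.List.foldl_append_eq_flatMap]
  rw [PySem.List.sorted_id_eq_sorted_id_iff_perm]
  set cs := peptide.toList with hcs
  set N := cs.length with hN
  have htot : (cs.map pvMass).sum = pvPref cs N := by
    unfold pvPref; rw [hN, List.take_length]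
  -- canonicalize the three element expressions to prefix-sum differences
  have hcan_lin : (PySem.List.pyRange 0 (N:Int)).flatMap (fun i =>
        (PySem.List.pyRange (i+1) ((N:Int)+1)).map (fun j =>
          PySem.List.pyGetD ((List.range (N+1)).map (fun k => pvPref cs k)) j 0 -
          PySem.List.pyGetD ((List.range (N+1)).map (fun k => pvPref cs k)) i 0))
      = (PySem.List.pyRange 0 (N:Int)).flatMap (fun i =>
        (PySem.List.pyRange (i+1) ((N:Int)+1)).map (fun j =>
          pvPref cs j.toNat - pvPref cs i.toNat)) := by
    apply List.flatMap_congr; intro i hi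
    rw [PySem.List.mem_pyRange_one] at hi
    apply List.map_congr_left; intro j hj
    rw [PySem.List.mem_pyRange_one] at hj
    rw [pvGetP cs j (by omega) (by omega), pvGetP cs i (by omega) (by omega)]
  have hcan_circ : (PySem.List.pyRange 0 (N:Int)).flatMap (fun i =>
        (PySem.List.pyRange (i+1) (N:Int)).map (fun j =>
          pvPref cs N -
          (PySem.List.pyGetD ((List.range (N+1)).map (fun k => pvPref cs k)) j 0 -
           PySem.List.pyGetD ((List.range (N+1)).map (fun k => pvPref cs k)) i 0)))
      = (PySem.List.pyRange 0 (N:Int)).flatMap (fun i =>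
        (PySem.List.pyRange (i+1) (N:Int)).map (fun j =>
          pvPref cs N - (pvPref cs j.toNat - pvPref cs i.toNat))) := by
    apply List.flatMap_congr; intro i hi
    rw [PySem.List.mem_pyRange_one] at hi
    apply List.map_congr_left; intro j hj
    rw [PySem.List.mem_pyRange_one] at hj
    rw [pvGetP cs j (by omega) (by omega), pvGetP cs i (by omega) (by omega)]
  have hcan_B : (PySem.List.pyRange 0 (N:Int)).flatMap (fun i =>
        (PySem.List.pyRange (i+1) ((N:Int)+1)).flatMap (fun j =>
          if j ≠ (N:Int) then
            [(PySem.List.slice (cs.map pvMass) (some i) (some j)).sum,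
             (cs.map pvMass).sum - (PySem.List.slice (cs.map pvMass) (some i) (some j)).sum]
          else [(PySem.List.slice (cs.map pvMass) (some i) (some j)).sum]))
      = (PySem.List.pyRange 0 (N:Int)).flatMap (fun i =>
        (PySem.List.pyRange (i+1) ((N:Int)+1)).flatMap (fun j =>
          if j ≠ (N:Int) then
            [pvPref cs j.toNat - pvPref cs i.toNat,
             pvPref cs N - (pvPref cs j.toNat - pvPref cs i.toNat)]
          else [pvPref cs j.toNat - pvPref cs i.toNat])) := by
    apply List.flatMap_congr; intro i hi
    rw [PySem.List.mem_pyRange_one] at hi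
    apply List.flatMap_congr; intro j hj
    rw [PySem.List.mem_pyRange_one] at hj
    obtain ⟨ki, rfl⟩ : ∃ k : Nat, i = (k : Int) := ⟨i.toNat, by omega⟩
    obtain ⟨kj, rfl⟩ : ∃ k : Nat, j = (k : Int) := ⟨j.toNat, by omega⟩
    rw [pvSlice_sum cs ki kj (by omega) (by omega), htot]
    simp
  rw [hcan_lin, hcan_circ, hcan_B]
  -- split j = N off both inner ranges
  have hlin2 : (PySem.List.pyRange 0 (N:Int)).flatMap (fun i =>
        (PySem.List.pyRange (i+1) ((N:Int)+1)).map (fun j => pvPref cs j.toNat - pvPref cs i.toNat))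
      = (PySem.List.pyRange 0 (N:Int)).flatMap (fun i =>
        (PySem.List.pyRange (i+1) (N:Int)).map (fun j => pvPref cs j.toNat - pvPref cs i.toNat)
          ++ [pvPref cs ((N:Int)).toNat - pvPref cs i.toNat]) := by
    apply List.flatMap_congr; intro i hi
    rw [PySem.List.mem_pyRange_one] at hi
    rw [PySem.List.pyRange_one_succ_right (by omega : i + 1 ≤ (N:Int)), List.map_append]
    simp
  have hB2 : (PySem.List.pyRange 0 (N:Int)).flatMap (fun i =>
        (PySem.List.pyRange (i+1) ((N:Int)+1)).flatMap (fun j =>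
          if j ≠ (N:Int) then
            [pvPref cs j.toNat - pvPref cs i.toNat,
             pvPref cs N - (pvPref cs j.toNat - pvPref cs i.toNat)]
          else [pvPref cs j.toNat - pvPref cs i.toNat]))
      = (PySem.List.pyRange 0 (N:Int)).flatMap (fun i =>
        (PySem.List.pyRange (i+1) (N:Int)).flatMap (fun j =>
          [pvPref cs j.toNat - pvPref cs i.toNat,
           pvPref cs N - (pvPref cs j.toNat - pvPref cs i.toNat)])
          ++ [pvPref cs ((N:Int)).toNat - pvPref cs i.toNat]) := by
    apply List.flatMap_congr; intro i hi
    rw [PySem.List.mem_pyRange_one] at hi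
    rw [PySem.List.pyRange_one_succ_right (by omega : i + 1 ≤ (N:Int)), List.flatMap_append]
    congr 1
    · apply List.flatMap_congr; intro j hj
      rw [PySem.List.mem_pyRange_one] at hj
      rw [if_pos (show j ≠ (N:Int) by omega)]
    · simp
  rw [hlin2, hB2]
  simp only [List.append_assoc]
  apply List.Perm.append_left
  -- names for the pieces
  have hpairs : ∀ i : Int,
      ((PySem.List.pyRange (i+1) (N:Int)).flatMap (fun j =>
        [pvPref cs j.toNat - pvPref cs i.toNat,
         pvPref cs N - (pvPref cs j.toNat - pvPref cs i.toNat)])).Perm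
      ((PySem.List.pyRange (i+1) (N:Int)).map (fun j => pvPref cs j.toNat - pvPref cs i.toNat)
        ++ (PySem.List.pyRange (i+1) (N:Int)).map (fun j =>
             pvPref cs N - (pvPref cs j.toNat - pvPref cs i.toNat))) := by
    intro i
    have h := List.flatMap_append_perm (PySem.List.pyRange (i+1) (N:Int))
      (fun j => [pvPref cs j.toNat - pvPref cs i.toNat])
      (fun j => [pvPref cs N - (pvPref cs j.toNat - pvPref cs i.toNat)])
    simp only [← List.map_eq_flatMap] at h
    refine List.Perm.trans ?_ h.symm
    apply List.Perm.flatMap_left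
    intro j _
    simp
  -- abbreviations
  set R := PySem.List.pyRange 0 (N:Int) with hR
  set Tmapf := fun i : Int => (PySem.List.pyRange (i+1) (N:Int)).map
      (fun j => pvPref cs j.toNat - pvPref cs i.toNat) with hTf
  set Tmapg := fun i : Int => (PySem.List.pyRange (i+1) (N:Int)).map
      (fun j => pvPref cs N - (pvPref cs j.toNat - pvPref cs i.toNat)) with hTg
  set Pairs := fun i : Int => (PySem.List.pyRange (i+1) (N:Int)).flatMap
      (fun j => [pvPref cs j.toNat - pvPref cs i.toNat,
                 pvPref cs N - (pvPref cs j.toNat - pvPref cs i.toNat)]) with hPr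
  set Last := fun i : Int => [pvPref cs ((N:Int)).toNat - pvPref cs i.toNat] with hL
  have hA : (R.flatMap (fun i => Tmapf i ++ Last i)).Perm
      (R.flatMap Tmapf ++ R.flatMap Last) :=
    (List.flatMap_append_perm R Tmapf Last).symm
  have hC : (R.flatMap (fun i => Pairs i ++ Last i)).Perm
      (R.flatMap Pairs ++ R.flatMap Last) :=
    (List.flatMap_append_perm R Pairs Last).symm
  have hCp : (R.flatMap Pairs).Perm (R.flatMap Tmapf ++ R.flatMap Tmapg) :=
    (List.Perm.flatMap_left R (fun i _ => hpairs i)).trans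
      (List.flatMap_append_perm R Tmapf Tmapg).symm
  refine ((hA.append_right (R.flatMap Tmapg)).trans ?_).trans
    (hC.trans ((hCp.append_right (R.flatMap Last)).trans (by rw [List.append_assoc]))).symm
  rw [List.append_assoc]
  exact List.Perm.append_left _ (List.perm_append_comm)

-- ===== VERDICT (by name: the statement is the Claim_ definition above) =====
theorem generate_spectrum_spec : Claim_equal_generate_spectrum := by
  intro peptide _ _
  unfold Spec_generate_spectrum
  exact pvMain peptide
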